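-- pv_equiv track=rewrite | github.com/rmiao6/AI- | idastar.py | Expand_man
-- ===== SOURCE A (Python) =====
-- def Expand_man(cur_node):
--
--
--     children_manhattan=[]
--     empty_tile=cur_node.index(0)
--     for action in actions:
--         new_empty_tile=empty_tile+action
--         while (new_empty_tile>=0) & (new_empty_tile<=15):
--             list_node=list(cur_node)
--             list_node[empty_tile]=list_node[new_empty_tile]
--             list_node[new_empty_tile]=0
--             child=tuple(list_node)
--             h_manhattan_distance=sum(abs((val-1)%4 - i%4) + abs((val-1)//4 - i//4)
--                                      for i, val in enumerate(child) if val)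
--
--             cost_manhattan_distance=h_manhattan_distance
--             child_manhattan=(cost_manhattan_distance,)+child+(action,)
--             children_manhattan.append(child_manhattan)
--             break
--
--     return children_manhattan
--
-- actions=[-1,1,4,-4]
-- ===== SOURCE B (Python) =====
-- actions = [-1, 1, 4, -4]
--
-- def _cost(pos, v):
--     return abs((v - 1) % 4 - pos % 4) + abs((v - 1) // 4 - pos // 4)
--
-- def _child(cur, e, base, a):
--     n = e + a
--     v = cur[n]
--     h = base - _cost(n, v) + _cost(e, v) if v else base
--     c = list(cur)
--     c[e] = v
--     c[n] = 0
--     return (h,) + tuple(c) + (a,)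
--
-- def Expand_man(cur_node):
--     e = cur_node.index(0)
--     base = sum(_cost(i, v) for i, v in enumerate(cur_node) if v)
--     return [_child(cur_node, e, base, a) for a in actions if 0 <= e + a <= 15]
-- ===== Notes on version B (the rewrite author's own statement) =====
-- stated objective: faster
-- what changed: B computes the Manhattan heuristic once for the parent and derives each child's heuristic by a constant-size delta for the single moved tile (and builds the children with a filter+comprehension), instead of re-summing all tiles for every child as A does.
import Mathlib
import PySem

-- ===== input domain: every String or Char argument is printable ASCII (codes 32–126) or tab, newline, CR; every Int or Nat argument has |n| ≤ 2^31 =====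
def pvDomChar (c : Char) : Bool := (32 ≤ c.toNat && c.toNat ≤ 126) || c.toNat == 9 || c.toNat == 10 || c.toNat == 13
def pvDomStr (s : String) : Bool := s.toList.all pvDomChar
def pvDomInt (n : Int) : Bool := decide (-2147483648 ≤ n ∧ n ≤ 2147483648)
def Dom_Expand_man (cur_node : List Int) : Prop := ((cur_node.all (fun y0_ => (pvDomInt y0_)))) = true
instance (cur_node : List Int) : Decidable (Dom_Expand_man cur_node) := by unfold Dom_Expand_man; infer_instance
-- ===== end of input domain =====

-- ===== PORT A =====
-- B differs from A only in how each child's Manhattan heuristic is obtained (one base scan + O(1) delta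
-- instead of a full re-summation per child); equal return values are proved on Pre_ below.

-- literal port of A's generator: sum(abs((val-1)%4 - i%4) + abs((val-1)//4 - i//4) for i, val in enumerate(child) if val)
def manSumA (child : List Int) : Int :=
  (PySem.List.enumerate child).foldl
    (fun acc p =>
      if p.2 ≠ 0 then
        acc + (|PySem.Int.mod (p.2 - 1) 4 - PySem.Int.mod p.1 4| +
               |PySem.Int.floordiv (p.2 - 1) 4 - PySem.Int.floordiv p.1 4|)
      else acc) 0

def Expand_man (cur_node : List Int) : List (List Int) :=
  match PySem.List.index? cur_node 0 with
  | none => []  -- cur_node.index(0) raises ValueError: excluded by Pre_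
  | some empty_tile =>
    [(-1 : Int), 1, 4, -4].foldl
      (fun acc action =>
        let new_empty_tile : Int := (empty_tile : Int) + action
        if 0 ≤ new_empty_tile ∧ new_empty_tile ≤ 15 then
          match PySem.List.pyGet? cur_node new_empty_tile with
          | none => acc  -- IndexError on short lists: excluded by Pre_
          | some v =>
            let child := (cur_node.set empty_tile v).set new_empty_tile.toNat 0
            acc ++ [[manSumA child] ++ child ++ [action]]
        else acc) []

-- ===== PORT B =====
def costB (pos : Int) (v : Int) : Int :=
  |PySem.Int.mod (v - 1) 4 - PySem.Int.mod pos 4| +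
  |PySem.Int.floordiv (v - 1) 4 - PySem.Int.floordiv pos 4|

def childB (cur : List Int) (e : Nat) (base : Int) (a : Int) : List Int :=
  let n : Int := (e : Int) + a
  match PySem.List.pyGet? cur n with
  | none => []  -- IndexError: excluded by Pre_
  | some v =>
    let h := if v ≠ 0 then base - costB n v + costB (e : Int) v else base
    [h] ++ ((cur.set e v).set n.toNat 0) ++ [a]

def Expand_man_alt (cur_node : List Int) : List (List Int) :=
  match PySem.List.index? cur_node 0 with
  | none => []
  | some e =>
    let base : Int :=
      (PySem.List.enumerate cur_node).foldl
        (fun acc p => if p.2 ≠ 0 then acc + costB p.1 p.2 else acc) 0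
    ([(-1 : Int), 1, 4, -4].filter
        (fun a => decide (0 ≤ (e : Int) + a ∧ (e : Int) + a ≤ 15))).map
      (childB cur_node e base)

-- ===== PRECONDITION & SPEC =====
-- Pre_ admits exactly the inputs on which A returns: cur_node must contain a 0 (else list.index raises
-- ValueError) and every in-window target square of the first 0 must be a valid index (else IndexError).
def Pre_Expand_man (cur_node : List Int) : Prop :=
  0 ∈ cur_node ∧
  ∀ a ∈ [(-1 : Int), 1, 4, -4],
    0 ≤ (((PySem.List.index? cur_node 0).getD 0 : Nat) : Int) + a →
    (((PySem.List.index? cur_node 0).getD 0 : Nat) : Int) + a ≤ 15 →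
    ((((PySem.List.index? cur_node 0).getD 0 : Nat) : Int) + a).toNat < cur_node.length
instance (cur_node : List Int) : Decidable (Pre_Expand_man cur_node) := by unfold Pre_Expand_man; infer_instance
def pvWitness_Expand_man : List Int := [1, 2, 3, 4, 5, 6, 7, 8, 9, 10, 11, 12, 13, 14, 15, 0]
def Spec_Expand_man (cur_node : List Int) (out : List (List Int)) : Prop := out = Expand_man_alt cur_node
instance (cur_node : List Int) (out : List (List Int)) : Decidable (Spec_Expand_man cur_node out) := by unfold Spec_Expand_man; infer_instance

-- ===== CLAIM (what is proved, stated in full; the proofs are below) =====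
def Claim_equal_Expand_man : Prop := ∀ (cur_node : List Int), Dom_Expand_man cur_node → Pre_Expand_man cur_node → Spec_Expand_man cur_node (Expand_man cur_node)

-- ===== LEMMAS AND PROOFS =====

-- the filtered per-tile cost A's generator adds for the entry (i, val)
def gCost (p : Int × Int) : Int :=
  if p.2 ≠ 0 then costB p.1 p.2 else 0

lemma manSumA_eq_sum (child : List Int) :
    manSumA child = ((PySem.List.enumerate child).map gCost).sum := by
  unfold manSumA
  rw [show (fun (acc : Int) (p : Int × Int) =>
        if p.2 ≠ 0 then
          acc + (|PySem.Int.mod (p.2 - 1) 4 - PySem.Int.mod p.1 4| +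
                 |PySem.Int.floordiv (p.2 - 1) 4 - PySem.Int.floordiv p.1 4|)
        else acc) = fun acc p => acc + gCost p by
      funext acc p; unfold gCost costB; split <;> simp]
  rw [PySem.List.foldl_add]
  simp

lemma sum_gCost_set (xs : List Int) :
    ∀ (j : Nat) (s v : Int), j < xs.length →
    ((PySem.List.enumerate (xs.set j v) s).map gCost).sum
      = ((PySem.List.enumerate xs s).map gCost).sum - gCost (s + j, xs[j]!) + gCost (s + j, v) := by
  induction xs with
  | nil => intro j s v h; simp at h
  | cons x xs ih =>
    intro j s v h
    cases j with
    | zero =>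
      simp [PySem.List.enumerate_cons]
      ring
    | succ j =>
      have hj : j < xs.length := by simpa using h
      simp only [List.set_cons_succ, PySem.List.enumerate_cons, List.map_cons, List.sum_cons]
      rw [ih j (s + 1) v hj]
      have : s + 1 + (j : Int) = s + (j + 1 : Nat) := by push_cast; ring
      rw [this]
      have : (x :: xs)[(j + 1 : Nat)]! = xs[j]! := by
        simp
      rw [this]
      ring

-- the heuristic delta: moving tile v = xs[n] into the empty square e changes the Manhattan sum by
-- gCost(e, v) - gCost(n, v)
lemma manSumA_swap (xs : List Int) (e n : Nat) (he : e < xs.length) (hn : n < xs.length)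
    (hne : e ≠ n) (h0 : xs[e]! = 0) :
    manSumA ((xs.set e xs[n]!).set n 0)
      = manSumA xs - gCost ((n : Int), xs[n]!) + gCost ((e : Int), xs[n]!) := by
  rw [manSumA_eq_sum, manSumA_eq_sum]
  rw [sum_gCost_set _ n 0 0 (by simpa using hn)]
  rw [sum_gCost_set _ e 0 (xs[n]!) he]
  have h1 : (xs.set e xs[n]!)[n]! = xs[n]! := by
    rw [List.getElem!_eq_getElem?_getD, List.getElem!_eq_getElem?_getD]
    rw [List.getElem?_set_ne (by omega)]
  rw [h1, h0]
  simp [gCost]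
  ring

lemma index?_facts (xs : List Int) (e : Nat) (h : PySem.List.index? xs 0 = some e) :
    e < xs.length ∧ xs[e]! = 0 := by
  obtain ⟨hk, hx, -⟩ := PySem.List.getElem_of_index?_eq_some h
  refine ⟨hk, ?_⟩
  rw [List.getElem!_eq_getElem?_getD, List.getElem?_eq_getElem hk, hx]
  rfl

-- one step of A's action loop equals appending B's child (under the bounds guaranteed by Pre_)
lemma step_eq (xs : List Int) (e : Nat) (acc : List (List Int)) (a : Int)
    (he : e < xs.length) (h0 : xs[e]! = 0) (ha : a ≠ 0)
    (hb : 0 ≤ (e : Int) + a → (e : Int) + a ≤ 15 → ((e : Int) + a).toNat < xs.length) :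
    (if 0 ≤ (e : Int) + a ∧ (e : Int) + a ≤ 15 then
        match PySem.List.pyGet? xs ((e : Int) + a) with
        | none => acc
        | some v => acc ++ [[manSumA ((xs.set e v).set ((e : Int) + a).toNat 0)] ++
                            ((xs.set e v).set ((e : Int) + a).toNat 0) ++ [a]]
      else acc)
      = acc ++ (if decide (0 ≤ (e : Int) + a ∧ (e : Int) + a ≤ 15) then
          [childB xs e (manSumA xs) a] else []) := by
  by_cases hc : 0 ≤ (e : Int) + a ∧ (e : Int) + a ≤ 15
  · obtain ⟨hc1, hc2⟩ := hc
    have hlt : ((e : Int) + a).toNat < xs.length := hb hc1 hc2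
    have hget : PySem.List.pyGet? xs ((e : Int) + a) = some (xs[((e : Int) + a).toNat]!) := by
      rw [PySem.List.pyGet?_of_nonneg _ hc1, List.getElem?_eq_getElem hlt,
        List.getElem!_eq_getElem?_getD, List.getElem?_eq_getElem hlt]
      rfl
    have hne : e ≠ ((e : Int) + a).toNat := by omega
    have hcast : ((((e : Int) + a).toNat : Nat) : Int) = (e : Int) + a := by omega
    simp only [hc1, hc2, and_self, if_true, hget, decide_eq_true_eq, childB]
    congr 2
    rw [manSumA_swap xs e (((e : Int) + a).toNat) he hlt hne h0]
    simp only [gCost, hcast, List.getElem!_eq_getElem?_getD]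
    split_ifs with hv <;> ring
  · simp [hc]

lemma base_eq (xs : List Int) :
    (PySem.List.enumerate xs).foldl
        (fun acc p => if p.2 ≠ 0 then acc + costB p.1 p.2 else acc) 0 = manSumA xs := by
  unfold manSumA costB
  rfl

lemma map_filter_cons {α β : Type} (f : α → β) (p : α → Bool) (a : α) (t : List α) :
    (List.filter p (a :: t)).map f = (if p a then [f a] else []) ++ (List.filter p t).map f := by
  by_cases h : p a <;> simp [h]

-- ===== VERDICT (by name: the statement is the Claim_ definition above) =====
theorem Expand_man_spec : Claim_equal_Expand_man := by
  intro cur_node _ hpre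
  obtain ⟨hmem, hbnd⟩ := hpre
  unfold Spec_Expand_man Expand_man Expand_man_alt
  obtain ⟨e, hidx⟩ : ∃ e, PySem.List.index? cur_node 0 = some e := by
    have := (PySem.List.index?_isSome_iff (xs := cur_node) (v := 0)).2 hmem
    exact Option.isSome_iff_exists.mp this
  obtain ⟨he, h0⟩ := index?_facts cur_node e hidx
  rw [hidx]
  simp only [hidx, Option.getD_some] at hbnd
  rw [base_eq]
  simp only [List.foldl]
  rw [step_eq cur_node e _ (-1) he h0 (by norm_num) (hbnd (-1) (by simp))]
  rw [step_eq cur_node e _ 1 he h0 (by norm_num) (hbnd 1 (by simp))]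
  rw [step_eq cur_node e _ 4 he h0 (by norm_num) (hbnd 4 (by simp))]
  rw [step_eq cur_node e _ (-4) he h0 (by norm_num) (hbnd (-4) (by simp))]
  rw [map_filter_cons, map_filter_cons, map_filter_cons, map_filter_cons]
  simp only [List.filter_nil, List.map_nil, List.append_nil, List.nil_append, List.append_assoc]
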